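-- pv_equiv track=rewrite | github.com/Elitedomainsx/seine-travel | autopilot/econ_fetch.py | _pick_sheet_name
-- ===== SOURCE A (Python) =====
-- from typing import List, Optional
--
-- def _pick_sheet_name(sheet_titles: List[str]) -> str:
--     """Try to choose the most likely 'logs' tab; fallback to the first tab."""
--     if not sheet_titles:
--         raise RuntimeError("No sheets found in spreadsheet")
--
--     preferred = [
--         "logs",
--         "log",
--         "events",
--         "clicks",
--         "click",
--         "data",
--     ]
--     low = {t.lower().strip(): t for t in sheet_titles}
--     for p in preferred:
--         for k, original in low.items():
--             if p == k or p in k: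
--                 return original
--     return sheet_titles[0]
-- ===== SOURCE B (Python) =====
-- from typing import List, Optional
--
-- _PREFERRED = [
--     "logs",
--     "log",
--     "events",
--     "clicks",
--     "click",
--     "data",
-- ]
--
-- def _pick_sheet_name(sheet_titles: List[str]) -> str:
--     """Try to choose the most likely 'logs' tab; fallback to the first tab."""
--     if not sheet_titles:
--         raise RuntimeError("No sheets found in spreadsheet")
--
--     low = {t.lower().strip(): t for t in sheet_titles}
--     best = None  # (score, original) with the lowest keyword-priority score seen so far
--     for k, original in low.items():
--         score = next((i for i, p in enumerate(_PREFERRED) if p in k), None)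
--         if score is not None and (best is None or score < best[0]):
--             best = (score, original)
--     return best[1] if best is not None else sheet_titles[0]
-- ===== Notes on version B (the rewrite author's own statement) =====
-- stated objective: alternative
-- what changed: A scans keywords in priority order with an inner early-return pass over the deduped titles; B makes a single title-major pass over the same deduped dict, computing each key's best-keyword index and keeping the strictly-lowest score (first wins on ties).
import Mathlib
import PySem

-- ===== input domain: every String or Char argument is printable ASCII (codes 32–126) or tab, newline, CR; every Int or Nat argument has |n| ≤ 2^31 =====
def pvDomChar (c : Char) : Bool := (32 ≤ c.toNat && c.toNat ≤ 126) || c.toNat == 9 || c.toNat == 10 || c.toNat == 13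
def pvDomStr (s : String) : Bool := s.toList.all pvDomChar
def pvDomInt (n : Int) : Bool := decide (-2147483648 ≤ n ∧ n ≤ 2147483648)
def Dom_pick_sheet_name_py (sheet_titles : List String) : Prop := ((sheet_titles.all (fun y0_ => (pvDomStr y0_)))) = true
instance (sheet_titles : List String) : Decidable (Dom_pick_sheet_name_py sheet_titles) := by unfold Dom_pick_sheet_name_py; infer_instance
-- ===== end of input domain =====

-- B replaces A's priority-major early-return double scan by a single argmin-by-score pass
-- over the deduplicated titles (alternative decomposition; same asymptotic cost).


-- ===== PORT A =====
-- low = {t.lower().strip(): t for t in sheet_titles}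
def pickA_low (ts : List String) : PySem.Dict String String :=
  ts.foldl (fun d t => d.insert (PySem.Str.strip (PySem.Str.lower t)) t) PySem.Dict.empty

-- inner loop: 'for k, original in low.items(): if p == k or p in k: return original'
def pickA_scanItems (p : String) : List (String × String) → Option String
  | [] => none
  | (k, original) :: rest =>
    if (p == k || PySem.Str.isIn p k) then some original else pickA_scanItems p rest

-- outer loop: 'for p in preferred: …'
def pickA_scanPrefs : List String → List (String × String) → Option String
  | [], _ => none
  | p :: ps, items =>
    match pickA_scanItems p items with
    | some o => some o
    | none => pickA_scanPrefs ps items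

def pick_sheet_name_py (sheet_titles : List String) : String :=
  match sheet_titles with
  | [] => ""   -- Python raises RuntimeError here; excluded by Pre_
  | t0 :: _ =>
    match pickA_scanPrefs ["logs", "log", "events", "clicks", "click", "data"]
        (pickA_low sheet_titles).items with
    | some o => o
    | none => t0

-- ===== PORT B =====
-- same dict comprehension as in Source B
def pickB_low (ts : List String) : PySem.Dict String String :=
  ts.foldl (fun d t => d.insert (PySem.Str.strip (PySem.Str.lower t)) t) PySem.Dict.empty

-- score = next((i for i, p in enumerate(_PREFERRED) if p in k), None)
def pickB_score (k : String) : List String → Option Nat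
  | [] => none
  | p :: ps => if PySem.Str.isIn p k then some 0 else (pickB_score k ps).map (· + 1)

-- one iteration of the argmin loop body (strict '<', so the earliest best key wins)
def pickB_step (prefs : List String) (b : Option (Nat × String)) (kv : String × String) :
    Option (Nat × String) :=
  match pickB_score kv.1 prefs with
  | none => b
  | some s =>
    match b with
    | none => some (s, kv.2)
    | some (bs, _) => if s < bs then some (s, kv.2) else b

def pick_sheet_name_py_alt (sheet_titles : List String) : String :=
  match sheet_titles with
  | [] => ""   -- Source B raises RuntimeError here; excluded by Pre_
  | t0 :: _ =>
    match (pickB_low sheet_titles).items.foldl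
        (pickB_step ["logs", "log", "events", "clicks", "click", "data"]) none with
    | some (_, o) => o
    | none => t0

-- ===== PRECONDITION & SPEC =====
-- Pre_ excludes only the empty list, on which both A and B raise RuntimeError.
def Pre_pick_sheet_name_py (sheet_titles : List String) : Prop := sheet_titles ≠ []
instance (sheet_titles : List String) : Decidable (Pre_pick_sheet_name_py sheet_titles) := by
  unfold Pre_pick_sheet_name_py; infer_instance

def pvWitness_pick_sheet_name_py : List String := ["Sheet1", "My Logs"]

def Spec_pick_sheet_name_py (sheet_titles : List String) (out : String) : Prop :=
  out = pick_sheet_name_py_alt sheet_titles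
instance (sheet_titles : List String) (out : String) :
    Decidable (Spec_pick_sheet_name_py sheet_titles out) := by
  unfold Spec_pick_sheet_name_py; infer_instance

-- ===== CLAIM (what is proved, stated in full; the proofs are below) =====
def Claim_equal_pick_sheet_name_py : Prop :=
  ∀ (sheet_titles : List String), Dom_pick_sheet_name_py sheet_titles →
    Pre_pick_sheet_name_py sheet_titles →
    Spec_pick_sheet_name_py sheet_titles (pick_sheet_name_py sheet_titles)

-- ===== LEMMAS AND PROOFS =====

-- 'p == k or p in k' is just 'p in k' (equality implies substring)
theorem pv_cond_collapse (p k : String) :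
    (p == k || PySem.Str.isIn p k) = PySem.Str.isIn p k := by
  cases h : p == k with
  | false => simp
  | true =>
    have hpk : p = k := by simpa using h
    subst hpk
    simp [PySem.Chars.isIn_iff_infix, List.infix_rfl]

theorem pv_scanItems_cons (p k o : String) (L : List (String × String)) :
    pickA_scanItems p ((k, o) :: L) =
      if PySem.Str.isIn p k then some o else pickA_scanItems p L := by
  simp only [pickA_scanItems, pv_cond_collapse]

theorem pv_score_cons (k p : String) (ps : List String) :
    pickB_score k (p :: ps) =
      if PySem.Str.isIn p k then some 0 else (pickB_score k ps).map (· + 1) := rfl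

theorem pv_score_isIn_false {k : String} {prefs : List String}
    (h : pickB_score k prefs = none) : ∀ p ∈ prefs, PySem.Str.isIn p k = false := by
  induction prefs with
  | nil => simp
  | cons p ps ih =>
    intro q hq
    cases hin : PySem.Chars.isIn p.toList k.toList with
    | true => simp [pv_score_cons, hin] at h
    | false =>
      have h' : pickB_score k ps = none := by
        simpa [pv_score_cons, hin] using h
      rcases List.mem_cons.1 hq with rfl | hq'
      · simpa using hin
      · exact ih h' q hq'

theorem pv_score_take_none {k : String} {prefs : List String}
    (h : pickB_score k prefs = none) (n : Nat) : pickB_score k (prefs.take n) = none := by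
  induction prefs generalizing n with
  | nil => simp [pickB_score]
  | cons p ps ih =>
    cases n with
    | zero => rfl
    | succ n =>
      cases hin : PySem.Chars.isIn p.toList k.toList with
      | true => simp [pv_score_cons, hin] at h
      | false =>
        have h' : pickB_score k ps = none := by simpa [pv_score_cons, hin] using h
        simp [pv_score_cons, hin, ih h' n]

theorem pv_score_take_of_lt {k : String} {prefs : List String} {s n : Nat}
    (h : pickB_score k prefs = some s) (hlt : s < n) :
    pickB_score k (prefs.take n) = some s := by
  induction prefs generalizing s n with
  | nil => simp [pickB_score] at h
  | cons p ps ih =>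
    cases n with
    | zero => omega
    | succ n =>
      cases hin : PySem.Chars.isIn p.toList k.toList with
      | true =>
        have hs : s = 0 := by simp [pv_score_cons, hin] at h; omega
        subst hs; simp [pv_score_cons, hin]
      | false =>
        simp only [pv_score_cons] at h
        rw [if_neg (by simp [hin])] at h
        rcases Option.map_eq_some_iff.1 h with ⟨s', hs', rfl⟩
        have hrec := ih hs' (show s' < n by omega)
        simp [pv_score_cons, hin, hrec]

theorem pv_score_take_of_ge {k : String} {prefs : List String} {s n : Nat}
    (h : pickB_score k prefs = some s) (hge : n ≤ s) :
    pickB_score k (prefs.take n) = none := by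
  induction prefs generalizing s n with
  | nil => simp [pickB_score] at h
  | cons p ps ih =>
    cases n with
    | zero => rfl
    | succ n =>
      cases hin : PySem.Chars.isIn p.toList k.toList with
      | true =>
        have : s = 0 := by simp [pv_score_cons, hin] at h; omega
        omega
      | false =>
        simp only [pv_score_cons] at h
        rw [if_neg (by simp [hin])] at h
        rcases Option.map_eq_some_iff.1 h with ⟨s', hs', rfl⟩
        have hrec := ih hs' (show n ≤ s' by omega)
        simp [pv_score_cons, hin, hrec]

theorem pv_scanPrefs_nil (ps : List String) : pickA_scanPrefs ps [] = none := by
  induction ps with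
  | nil => rfl
  | cons p ps ih => simp [pickA_scanPrefs, pickA_scanItems, ih]

-- an item matching no preferred keyword is skipped by A's scan
theorem pv_scanPrefs_skip {k : String} {prefs : List String}
    (h : ∀ p ∈ prefs, PySem.Str.isIn p k = false) (o : String) (L : List (String × String)) :
    pickA_scanPrefs prefs ((k, o) :: L) = pickA_scanPrefs prefs L := by
  induction prefs with
  | nil => rfl
  | cons p ps ih =>
    have hp : PySem.Str.isIn p k = false := h p (by simp)
    rw [pickA_scanPrefs, pv_scanItems_cons, if_neg (by rw [hp]; simp : ¬ PySem.Str.isIn p k = true),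
      ih (fun q hq => h q (by simp [hq])), pickA_scanPrefs]

-- decomposition of A's scan at a leading item whose score is s
theorem pv_scanPrefs_cons {k : String} {prefs : List String} {s : Nat}
    (h : pickB_score k prefs = some s) (o : String) (L : List (String × String)) :
    pickA_scanPrefs prefs ((k, o) :: L) =
      some ((pickA_scanPrefs (prefs.take s) L).getD o) := by
  induction prefs generalizing s with
  | nil => simp [pickB_score] at h
  | cons p ps ih =>
    cases hin : PySem.Chars.isIn p.toList k.toList with
    | true =>
      have hs : s = 0 := by simp [pv_score_cons, hin] at h; omega
      subst hs
      rw [pickA_scanPrefs, pv_scanItems_cons, if_pos (by simp [hin])]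
      simp [pickA_scanPrefs]
    | false =>
      simp only [pv_score_cons] at h
      rw [if_neg (by simp [hin])] at h
      rcases Option.map_eq_some_iff.1 h with ⟨s', hs', rfl⟩
      rw [pickA_scanPrefs, pv_scanItems_cons, if_neg (by simp [hin])]
      rw [List.take_succ_cons, pickA_scanPrefs]
      cases hscan : pickA_scanItems p L with
      | some r => simp
      | none => simp [ih hs']

-- the fold continued from an already-found best (score s, value o)
theorem pv_fold_some (prefs : List String) (L : List (String × String)) :
    ∀ (s : Nat) (o : String),
    (L.foldl (pickB_step prefs) (some (s, o))).map Prod.snd =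
      some ((pickA_scanPrefs (prefs.take s) L).getD o) := by
  induction L with
  | nil => intro s o; simp [pv_scanPrefs_nil]
  | cons kv L ih =>
    intro s o
    obtain ⟨k, o'⟩ := kv
    rw [List.foldl_cons]
    cases hsc : pickB_score k prefs with
    | none =>
      have hskip := pv_scanPrefs_skip (prefs := prefs.take s)
        (pv_score_isIn_false (pv_score_take_none hsc s)) o' L
      rw [show pickB_step prefs (some (s, o)) (k, o') = some (s, o) by
        simp [pickB_step, hsc], ih s o, hskip]
    | some s' =>
      by_cases hlt : s' < s
      · have hdec := pv_scanPrefs_cons (pv_score_take_of_lt hsc hlt) o' L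
        rw [List.take_take, Nat.min_eq_left (by omega)] at hdec
        rw [show pickB_step prefs (some (s, o)) (k, o') = some (s', o') by
          simp [pickB_step, hsc, hlt], ih s' o', hdec]
        simp
      · have hskip := pv_scanPrefs_skip (prefs := prefs.take s)
          (pv_score_isIn_false (pv_score_take_of_ge hsc (by omega))) o' L
        rw [show pickB_step prefs (some (s, o)) (k, o') = some (s, o) by
          simp [pickB_step, hsc, hlt], ih s o, hskip]

-- the whole argmin fold computes exactly A's priority-major scan
theorem pv_fold_eq_scan (prefs : List String) (L : List (String × String)) :
    (L.foldl (pickB_step prefs) none).map Prod.snd = pickA_scanPrefs prefs L := by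
  induction L with
  | nil => simp [pv_scanPrefs_nil]
  | cons kv L ih =>
    obtain ⟨k, o⟩ := kv
    rw [List.foldl_cons]
    cases hsc : pickB_score k prefs with
    | none =>
      rw [pv_scanPrefs_skip (pv_score_isIn_false hsc) o L,
        show pickB_step prefs none (k, o) = none by simp [pickB_step, hsc], ih]
    | some s =>
      rw [pv_scanPrefs_cons hsc o L,
        show pickB_step prefs none (k, o) = some (s, o) by simp [pickB_step, hsc],
        pv_fold_some]

-- ===== VERDICT (by name: the statement is the Claim_ definition above) =====
theorem pick_sheet_name_py_spec : Claim_equal_pick_sheet_name_py := by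
  intro sheet_titles _ hpre
  unfold Spec_pick_sheet_name_py
  cases sheet_titles with
  | nil => exact absurd rfl hpre
  | cons t0 rest =>
    unfold pick_sheet_name_py pick_sheet_name_py_alt
    have h := pv_fold_eq_scan ["logs", "log", "events", "clicks", "click", "data"]
      (pickB_low (t0 :: rest)).items
    have hlow : pickA_low (t0 :: rest) = pickB_low (t0 :: rest) := rfl
    rw [hlow]
    cases hf : (pickB_low (t0 :: rest)).items.foldl
        (pickB_step ["logs", "log", "events", "clicks", "click", "data"]) none with
    | none => rw [hf] at h; simp at h; rw [← h]
    | some p => obtain ⟨s, o⟩ := p; rw [hf] at h; simp at h; rw [← h]
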